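-- pv_equiv track=rewrite | github.com/or-m-or/KT-AIVLE-School-5th_Codingmasters | example/round1/LV1_Beginner/page5/8517_Answer.py | sum_fibo_fibo
-- ===== SOURCE A (Python) =====
-- def generate_fibo(n):
--     """
--     Generate a Fibonacci sequence up to the n-th term.
--
--     :param n: The number of terms to generate.
--     :return: A list containing the Fibonacci sequence up to n terms.
--     """
--     if n <= 0:
--         return []
--     elif n == 1:
--         return [1]
--     elif n == 2:
--         return [1, 1]
--
--     fibonacci = [1, 1]
--     for i in range(2, n):
--         fibonacci.append(fibonacci[-1] + fibonacci[-2])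
--     return fibonacci
--
-- def sum_fibo_fibo(a, b):
--     """
--     Correctly calculate the sum of the Fibonacci Fibonacci sequence from the a-th to the b-th term.
--
--     :param a: The starting term index.
--     :param b: The ending term index.
--     :return: The sum of the terms from a to b in the Fibonacci Fibonacci sequence.
--     """
--     # 기본 피보나치 수열 생성
--     n = 50
--     fibonacci = generate_fibo(n)
--
--     # 피보나치 피보나치 수열의 각 항을 카운팅하는 데 사용될 변수들
--     fibo_fibo_sum = 0
--     current_index = 1  # 현재 항의 인덱스
--
--     # 각 피보나치 수의 값을 그 수만큼 반복하면서 합계 계산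
--     for fibo_num in fibonacci:
--         for _ in range(fibo_num):
--             if current_index >= a and current_index <= b:
--                 fibo_fibo_sum += fibo_num
--             elif current_index > b:
--                 break  # b항을 초과하면 더 이상 계산할 필요가 없음
--             current_index += 1
--
--     return fibo_fibo_sum
-- ===== SOURCE B (Python) =====
-- def sum_fibo_fibo(a, b):
--     total = 0
--     start = 1  # first index of the current block
--     x, y = 1, 1
--     for _ in range(50):
--         lo = max(a, start)
--         hi = min(b, start + x - 1)
--         if lo <= hi:
--             total += x * (hi - lo + 1)
--         start += x
--         x, y = y, x + y
--     return total
-- ===== Notes on version B (the rewrite author's own statement) =====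
-- stated objective: faster
-- what changed: A walks the value-repeated Fibonacci sequence index by index (inner loop repeats each Fibonacci value fib(k) times until passing b); B iterates over the 50 Fibonacci blocks once and adds value times the length of the block's index-range overlap with [a,b].
import Mathlib
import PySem

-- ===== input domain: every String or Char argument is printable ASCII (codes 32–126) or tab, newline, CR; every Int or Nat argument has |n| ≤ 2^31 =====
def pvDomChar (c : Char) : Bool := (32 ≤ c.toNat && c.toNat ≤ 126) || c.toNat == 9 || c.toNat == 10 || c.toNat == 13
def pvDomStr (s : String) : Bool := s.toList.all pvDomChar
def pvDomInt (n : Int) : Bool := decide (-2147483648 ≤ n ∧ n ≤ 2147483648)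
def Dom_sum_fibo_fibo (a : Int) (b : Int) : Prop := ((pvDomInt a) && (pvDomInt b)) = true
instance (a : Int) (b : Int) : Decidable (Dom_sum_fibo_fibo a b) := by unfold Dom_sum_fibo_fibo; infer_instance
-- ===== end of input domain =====

-- B replaces A's value-by-value repetition loop with a per-block overlap formula (50 blocks, O(1) in b); faster.

-- ===== PORT A =====
-- generate_fibo: the pyGet? … .getD 0 is exact — the accumulator always has ≥ 2 elements, so -1/-2 are in range
def generate_fibo (n : Int) : List Int :=
  if n ≤ 0 then []
  else if n = 1 then [1]
  else if n = 2 then [1, 1]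
  else
    (PySem.List.pyRange 2 n 1).foldl
      (fun fibonacci _ =>
        fibonacci ++ [((PySem.List.pyGet? fibonacci (-1)).getD 0) +
                      ((PySem.List.pyGet? fibonacci (-2)).getD 0)])
      [1, 1]

-- the inner 'for _ in range(fibo_num)' loop of A: state (sum, current_index), early break when current_index > b
def pvInnerA (a b v : Int) : Nat → Int → Int → Int × Int
  | 0, idx, s => (s, idx)
  | f+1, idx, s =>
    if a ≤ idx ∧ idx ≤ b then pvInnerA a b v f (idx + 1) (s + v)
    else if b < idx then (s, idx)
    else pvInnerA a b v f (idx + 1) s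

def sum_fibo_fibo (a : Int) (b : Int) : Int :=
  let fibonacci := generate_fibo 50
  (fibonacci.foldl (fun st v => pvInnerA a b v v.toNat st.2 st.1) (0, 1)).1

-- ===== PORT B =====
-- B's Fibonacci generator: the 'x, y = 1, 1 … x, y = y, x + y' loop collecting x each round
def pvFibB : Nat → Int → Int → List Int
  | 0, _, _ => []
  | n+1, x, y => x :: pvFibB n y (x + y)

def sum_fibo_fibo_alt (a : Int) (b : Int) : Int :=
  ((pvFibB 50 1 1).foldl
    (fun (st : Int × Int) x =>
      let lo := max a st.1
      let hi := min b (st.1 + x - 1)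
      (st.1 + x, st.2 + (if lo ≤ hi then x * (hi - lo + 1) else 0)))
    (1, 0)).2

-- ===== PRECONDITION & SPEC =====
def Spec_sum_fibo_fibo (a : Int) (b : Int) (out : Int) : Prop := out = sum_fibo_fibo_alt a b
instance (a : Int) (b : Int) (out : Int) : Decidable (Spec_sum_fibo_fibo a b out) := by unfold Spec_sum_fibo_fibo; infer_instance

-- ===== CLAIM (what is proved, stated in full; the proofs are below) =====
def Claim_equal_sum_fibo_fibo : Prop := ∀ (a : Int) (b : Int), Dom_sum_fibo_fibo a b → Spec_sum_fibo_fibo a b (sum_fibo_fibo a b)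

-- ===== LEMMAS AND PROOFS =====

-- A's inner loop in closed form: it adds v once per index of [idx, idx+f-1] ∩ [a, b],
-- and the index pointer stops at b+1 (it never moves past b+1, and never moves at all if already beyond).
lemma pvInnerA_eq (a b v : Int) :
    ∀ (f : Nat) (idx s : Int),
      pvInnerA a b v f idx s =
        (s + v * max 0 (min b (idx + (f : Int) - 1) - max a idx + 1),
         min (idx + (f : Int)) (max idx (b + 1))) := by
  intro f
  induction f with
  | zero =>
    intro idx s
    have h0 : max 0 (min b (idx + ((0 : Nat) : Int) - 1) - max a idx + 1) = 0 := by omega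
    simp only [pvInnerA, h0, Prod.mk.injEq]
    constructor
    · ring
    · omega
  | succ f ih =>
    intro idx s
    simp only [pvInnerA]
    split_ifs with h1 h2
    · rw [ih]
      simp only [Prod.mk.injEq]
      have hm : max 0 (min b (idx + ((f + 1 : Nat) : Int) - 1) - max a idx + 1) =
          max 0 (min b (idx + 1 + ((f : Nat) : Int) - 1) - max a (idx + 1) + 1) + 1 := by
        push_cast; omega
      constructor
      · rw [hm]; ring
      · push_cast; omega
    · simp only [Prod.mk.injEq]
      have hm : max 0 (min b (idx + ((f + 1 : Nat) : Int) - 1) - max a idx + 1) = 0 := by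
        push_cast; omega
      constructor
      · rw [hm]; ring
      · push_cast; omega
    · rw [ih]
      simp only [Prod.mk.injEq]
      have hm : max 0 (min b (idx + ((f + 1 : Nat) : Int) - 1) - max a idx + 1) =
          max 0 (min b (idx + 1 + ((f : Nat) : Int) - 1) - max a (idx + 1) + 1) := by
        push_cast; omega
      constructor
      · rw [hm]
      · push_cast; omega

-- all 50 Fibonacci values are nonnegative, and B's generator agrees with A's
lemma fib_lists_eq : pvFibB 50 1 1 = generate_fibo 50 := by decide
lemma fib_nonneg : ∀ v ∈ generate_fibo 50, 0 ≤ v := by decide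

-- the two folds, related: A's state is (sum, min start M) where (start, sum) is B's state and M = max 1 (b+1)
lemma fold_eq (a b : Int) :
    ∀ (l : List Int) (start s : Int), 1 ≤ start → (∀ v ∈ l, 0 ≤ v) →
      l.foldl (fun st v => pvInnerA a b v v.toNat st.2 st.1) (s, min start (max 1 (b + 1))) =
        ((l.foldl (fun (st : Int × Int) x =>
            (st.1 + x, st.2 + (if max a st.1 ≤ min b (st.1 + x - 1)
              then x * (min b (st.1 + x - 1) - max a st.1 + 1) else 0))) (start, s)).2,
         min (l.foldl (fun (st : Int × Int) x =>
            (st.1 + x, st.2 + (if max a st.1 ≤ min b (st.1 + x - 1)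
              then x * (min b (st.1 + x - 1) - max a st.1 + 1) else 0))) (start, s)).1
           (max 1 (b + 1))) := by
  intro l
  induction l with
  | nil => intro start s hs _; simp
  | cons v t ih =>
    intro start s hs hpos
    have hv : 0 ≤ v := hpos v (List.mem_cons_self ..)
    have hvnat : ((v.toNat : Int)) = v := Int.toNat_of_nonneg hv
    simp only [List.foldl_cons]
    rw [pvInnerA_eq, hvnat]
    have hidx : min (min start (max 1 (b + 1)) + v) (max (min start (max 1 (b + 1))) (b + 1)) =
        min (start + v) (max 1 (b + 1)) := by omega
    have hsum : s + v * max 0 (min b (min start (max 1 (b + 1)) + v - 1) - max a (min start (max 1 (b + 1))) + 1) =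
        s + (if max a start ≤ min b (start + v - 1) then v * (min b (start + v - 1) - max a start + 1) else 0) := by
      have h : max 0 (min b (min start (max 1 (b + 1)) + v - 1) - max a (min start (max 1 (b + 1))) + 1) =
          (if max a start ≤ min b (start + v - 1) then min b (start + v - 1) - max a start + 1 else 0) := by
        split_ifs <;> omega
      rw [h]; split_ifs <;> ring
    rw [hidx, hsum]
    exact ih (start + v) _ (by omega) (fun w hw => hpos w (List.mem_cons_of_mem _ hw))

-- ===== VERDICT (by name: the statement is the Claim_ definition above) =====
theorem sum_fibo_fibo_spec : Claim_equal_sum_fibo_fibo := by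
  intro a b _
  have h := fold_eq a b (generate_fibo 50) 1 0 (by omega) fib_nonneg
  rw [show min 1 (max 1 (b + 1)) = (1 : Int) by omega] at h
  show sum_fibo_fibo a b = sum_fibo_fibo_alt a b
  simp only [sum_fibo_fibo, sum_fibo_fibo_alt, fib_lists_eq, h]
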